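-- pv_equiv track=rewrite | github.com/Ozairfzn/Okayy | OC Informatique/L-système/Flocon.py | iterer_lsysteme_1
-- ===== SOURCE A (Python) =====
-- def iterer_lsysteme_1(depart, regle, k):
--     res = ""
--     ini = depart
--     for i in range(k):
--         for j in ini:
--             if j == regle[0]:
--                 res += regle[1]
--             else:
--                 res += j
--         ini, res = res, ""
--     return ini
-- ===== SOURCE B (Python) =====
-- def iterer_lsysteme_1(depart, regle, k):
--     # Recursive per-symbol expansion: expand(c, n) = n-step expansion of one symbol;
--     # the whole result is the concatenation of expand(c, k) over the axiom.
--     def expand(n, c):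
--         if n <= 0 or c != regle[0]:
--             return c
--         return "".join(expand(n - 1, d) for d in regle[1])
--     return "".join(expand(k, c) for c in depart)
-- ===== Notes on version B (the rewrite author's own statement) =====
-- stated objective: faster
-- what changed: A iteratively rewrites the whole growing string k times with += concatenation; B defines a recursive per-symbol expansion expand(n,c) (recursion on the step count over the production's symbols) and concatenates expand(k,c) over the axiom, never materialising the k intermediate generations.
import Mathlib
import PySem

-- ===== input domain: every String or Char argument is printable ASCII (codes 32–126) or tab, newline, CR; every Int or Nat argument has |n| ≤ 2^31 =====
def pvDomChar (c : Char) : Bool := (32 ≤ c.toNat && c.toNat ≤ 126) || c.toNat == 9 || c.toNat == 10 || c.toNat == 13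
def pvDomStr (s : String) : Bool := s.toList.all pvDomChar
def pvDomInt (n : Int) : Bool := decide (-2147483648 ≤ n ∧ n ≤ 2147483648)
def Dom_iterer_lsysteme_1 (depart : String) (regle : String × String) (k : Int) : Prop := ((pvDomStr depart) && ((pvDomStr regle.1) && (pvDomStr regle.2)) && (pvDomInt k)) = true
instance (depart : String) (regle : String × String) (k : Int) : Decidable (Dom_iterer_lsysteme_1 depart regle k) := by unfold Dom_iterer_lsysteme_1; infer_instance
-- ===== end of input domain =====

-- B replaces A's k whole-string rewriting passes by a recursive per-symbol expansion
-- (recursion on the step count over the production's symbols), concatenated once over the axiom.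

-- ===== PORT A =====
-- each of the k passes scans ini, appending regle[1] for the rewritten symbol, else the char
def iterer_lsysteme_1 (depart : String) (regle : String × String) (k : Int) : String :=
  String.ofList <|
    (PySem.List.pyRange 0 k 1).foldl
      (fun ini _ =>
        ini.foldl (fun res j => if String.ofList [j] = regle.1 then res ++ regle.2.toList else res ++ [j]) [])
      depart.toList

-- ===== PORT B =====
-- expand(n, c): n-step expansion of a single symbol, recursing on n over the production
def pvExpand (regle : String × String) : Nat → Char → List Char
  | 0, c => [c]
  | n + 1, c =>
      if String.ofList [c] = regle.1 then regle.2.toList.flatMap (pvExpand regle n) else [c]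

def iterer_lsysteme_1_alt (depart : String) (regle : String × String) (k : Int) : String :=
  String.ofList (depart.toList.flatMap (pvExpand regle k.toNat))

-- ===== PRECONDITION & SPEC =====
def Spec_iterer_lsysteme_1 (depart : String) (regle : String × String) (k : Int) (out : String) : Prop := out = iterer_lsysteme_1_alt depart regle k
instance (depart : String) (regle : String × String) (k : Int) (out : String) : Decidable (Spec_iterer_lsysteme_1 depart regle k out) := by unfold Spec_iterer_lsysteme_1; infer_instance

-- ===== CLAIM =====
def Claim_equal_iterer_lsysteme_1 : Prop := ∀ (depart : String) (regle : String × String) (k : Int), Dom_iterer_lsysteme_1 depart regle k → Spec_iterer_lsysteme_1 depart regle k (iterer_lsysteme_1 depart regle k)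

-- ===== LEMMAS AND PROOFS =====

-- one rewriting pass as a flatMap (proof-side name for the per-character substitution)
def pvSub (regle : String × String) (l : List Char) : List Char :=
  l.flatMap (fun c => if String.ofList [c] = regle.1 then regle.2.toList else [c])

-- A's inner accumulator loop computes one rewriting pass
theorem pvFoldlInner (regle : String × String) (l : List Char) (acc : List Char) :
    l.foldl (fun res j => if String.ofList [j] = regle.1 then res ++ regle.2.toList else res ++ [j]) acc
      = acc ++ pvSub regle l := by
  induction l generalizing acc with
  | nil => simp [pvSub]
  | cons c t ih =>
    simp only [List.foldl_cons, pvSub, List.flatMap_cons]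
    rw [ih]
    split <;> simp [pvSub]

-- a foldl ignoring the list elements is iteration of the step, once per element
theorem pvFoldlIter {α β : Type} (g : α → α) (l : List β) (x : α) :
    l.foldl (fun a _ => g a) x = g^[l.length] x := by
  induction l generalizing x with
  | nil => rfl
  | cons b t ih => simp [List.foldl_cons, ih, Function.iterate_succ_apply]

-- a symbol other than the rewritten one expands to itself
theorem pvExpandNe (regle : String × String) (n : Nat) (c : Char)
    (h : String.ofList [c] ≠ regle.1) : pvExpand regle n c = [c] := by
  cases n with
  | zero => rfl
  | succ n => simp [pvExpand, h]

-- n rewriting passes = concatenated n-step per-symbol expansions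
theorem pvIterEqExpand (regle : String × String) (n : Nat) (l : List Char) :
    (pvSub regle)^[n] l = l.flatMap (pvExpand regle n) := by
  induction n generalizing l with
  | zero => simp [pvExpand]
  | succ n ih =>
    rw [Function.iterate_succ_apply, ih, pvSub, List.flatMap_assoc]
    refine List.flatMap_congr (fun c _ => ?_)
    by_cases h : String.ofList [c] = regle.1
    · simp [pvExpand, h]
    · simp [pvExpandNe regle n c h, pvExpand, h]

-- ===== VERDICT =====
theorem iterer_lsysteme_1_spec : Claim_equal_iterer_lsysteme_1 := by
  intro depart regle k _
  unfold Spec_iterer_lsysteme_1 iterer_lsysteme_1 iterer_lsysteme_1_alt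
  have hA : (fun (ini : List Char) (_ : Int) =>
        ini.foldl (fun res j => if String.ofList [j] = regle.1 then res ++ regle.2.toList else res ++ [j]) [])
      = fun ini _ => pvSub regle ini := by
    funext ini i
    simpa using pvFoldlInner regle ini []
  rw [hA, pvFoldlIter, PySem.List.length_pyRange_one]
  rw [show k - 0 = k from by ring, pvIterEqExpand]
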